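-- pv_equiv track=rewrite | github.com/asmii14/CNS_LAB | sayali.py | calculate_bonus
-- ===== SOURCE A (Python) =====
-- def calculate_bonus(rating):
--     even_product = 1
--     odd_product = 1
--     has_even = False  # To track if there are non-zero even digits
--
--     # Process each digit in the rating
--     for digit in str(rating):
--         digit = int(digit)
--         if digit != 0 and digit % 2 == 0:
--             even_product *= digit
--             has_even = True
--         elif digit % 2 == 1:
--             odd_product *= digit
--
--     # If no non-zero even digits, set even_product to 0
--     if not has_even:
--         even_product = 0
--
--     # Calculate the bonus
--     bonus = even_product - odd_product
--     return max(bonus, 0)  # Return 0 if the bonus is negative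
-- ===== SOURCE B (Python) =====
-- def calculate_bonus(rating):
--     def go(n):
--         d = n % 10
--         if n < 10:
--             e, o = None, 1
--         else:
--             e, o = go(n // 10)
--         if d != 0 and d % 2 == 0:
--             e = d if e is None else e * d
--         elif d % 2 == 1:
--             o = o * d
--         return e, o
--
--     e, o = go(rating)
--     return max((0 if e is None else e) - o, 0)
-- ===== Notes on version B (the rewrite author's own statement) =====
-- stated objective: alternative
-- what changed: B never converts the number to a string: it extracts digits arithmetically by a recursive divmod (n % 10, n // 10) and carries the even product as an optional value instead of A's has_even flag.
import Mathlib
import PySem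

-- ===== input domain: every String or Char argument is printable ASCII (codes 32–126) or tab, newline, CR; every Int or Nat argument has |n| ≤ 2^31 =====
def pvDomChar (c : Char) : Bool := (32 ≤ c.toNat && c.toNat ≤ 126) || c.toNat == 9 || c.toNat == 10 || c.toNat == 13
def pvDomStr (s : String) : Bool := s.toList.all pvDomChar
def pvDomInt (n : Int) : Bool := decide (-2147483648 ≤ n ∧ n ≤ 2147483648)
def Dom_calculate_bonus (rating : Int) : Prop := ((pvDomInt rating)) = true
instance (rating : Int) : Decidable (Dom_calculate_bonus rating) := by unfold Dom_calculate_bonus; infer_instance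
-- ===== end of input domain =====

-- B extracts the digits arithmetically by recursive divmod (n % 10, n // 10) instead of
-- iterating over str(rating), and carries the even product as an optional value instead of
-- a has_even flag; same O(#digits) cost (objective: alternative).


-- ===== PORT A =====
-- int(ch) for one character of str(rating); exact whenever Python's int() succeeds —
-- Pre_ excludes negative ratings, where int('-') raises ValueError
def pyDigit (c : Char) : Int := (PySem.Int.ofChars? [c]).getD 0

def calculate_bonus (rating : Int) : Int :=
  let st := (PySem.Int.toChars rating).foldl
    (fun (st : Int × Int × Bool) c =>
      let d := pyDigit c
      if d ≠ 0 ∧ PySem.Int.mod d 2 = 0 then (st.1 * d, st.2.1, true)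
      else if PySem.Int.mod d 2 = 1 then (st.1, st.2.1 * d, st.2.2)
      else st)
    (1, 1, false)
  let even_product := if st.2.2 then st.1 else 0
  max (even_product - st.2.1) 0

-- ===== PORT B =====
-- inner recursive helper go(n) of Source B: (even product as Option, odd product)
def goB (n : Int) : Option Int × Int :=
  let d := PySem.Int.mod n 10
  let eo := if _h : n < 10 then ((none : Option Int), (1 : Int))
            else goB (PySem.Int.floordiv n 10)
  if d ≠ 0 ∧ PySem.Int.mod d 2 = 0 then
    (some (match eo.1 with | none => d | some e => e * d), eo.2)
  else if PySem.Int.mod d 2 = 1 then (eo.1, eo.2 * d)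
  else eo
termination_by n.toNat
decreasing_by
  have h10 : PySem.Int.floordiv n 10 = n / 10 :=
    PySem.Int.floordiv_eq_ediv_of_pos (by norm_num)
  rw [h10]; omega

def calculate_bonus_alt (rating : Int) : Int :=
  let eo := goB rating
  max ((match eo.1 with | none => 0 | some e => e) - eo.2) 0

-- ===== PRECONDITION & SPEC =====
-- A raises ValueError on negative ratings (int('-') on the sign character); excluded
def Pre_calculate_bonus (rating : Int) : Prop := 0 ≤ rating
instance (rating : Int) : Decidable (Pre_calculate_bonus rating) := by unfold Pre_calculate_bonus; infer_instance
def pvWitness_calculate_bonus : Int := 2480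

def Spec_calculate_bonus (rating : Int) (out : Int) : Prop := out = calculate_bonus_alt rating
instance (rating : Int) (out : Int) : Decidable (Spec_calculate_bonus rating out) := by unfold Spec_calculate_bonus; infer_instance

-- ===== CLAIM (what is proved, stated in full; the proofs are below) =====
def Claim_equal_calculate_bonus : Prop := ∀ (rating : Int), Dom_calculate_bonus rating → Pre_calculate_bonus rating → Spec_calculate_bonus rating (calculate_bonus rating)

-- ===== LEMMAS AND PROOFS =====

-- A's loop body and B's digit-combining step, as named functions over the digit value
def stepA (st : Int × Int × Bool) (d : Int) : Int × Int × Bool :=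
  if d ≠ 0 ∧ PySem.Int.mod d 2 = 0 then (st.1 * d, st.2.1, true)
  else if PySem.Int.mod d 2 = 1 then (st.1, st.2.1 * d, st.2.2)
  else st

def stepB (eo : Option Int × Int) (d : Int) : Option Int × Int :=
  if d ≠ 0 ∧ PySem.Int.mod d 2 = 0 then
    (some (match eo.1 with | none => d | some e => e * d), eo.2)
  else if PySem.Int.mod d 2 = 1 then (eo.1, eo.2 * d)
  else eo

-- big-endian decimal digit characters of a Nat (spec for Nat.toDigits 10)
def digs (n : Nat) : List Char :=
  if n < 10 then [Nat.digitChar n] else digs (n / 10) ++ [Nat.digitChar (n % 10)]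
termination_by n
decreasing_by omega

theorem toDigitsCore_eq_digs (f : Nat) : ∀ (n : Nat) (l : List Char), n < f →
    Nat.toDigitsCore 10 f n l = digs n ++ l := by
  induction f with
  | zero => intro n l h; omega
  | succ f ih =>
    intro n l h
    rw [Nat.toDigitsCore]
    by_cases h10 : n < 10
    · have hz : n / 10 = 0 := by omega
      rw [digs, if_pos h10]
      simp [hz, Nat.mod_eq_of_lt h10]
    · have hz : ¬ n / 10 = 0 := by omega
      rw [if_neg hz, ih (n / 10) _ (by omega)]
      conv_rhs => rw [digs, if_neg h10]
      simp

theorem toChars_nonneg (m : Nat) : PySem.Int.toChars (m : Int) = digs m := by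
  have h : ¬ ((m : Int) < 0) := by omega
  simp only [PySem.Int.toChars, if_neg h, Int.toNat_natCast, Nat.toDigits]
  simpa using toDigitsCore_eq_digs (m + 1) m [] (by omega)

theorem pyDigit_digitChar (r : Nat) (h : r < 10) :
    pyDigit (Nat.digitChar r) = (r : Int) := by
  interval_cases r <;> decide

-- B's recursion computes the stepB-fold over the big-endian digit list
theorem goB_digs (m : Nat) :
    goB (m : Int) = ((digs m).map pyDigit).foldl stepB (none, 1) := by
  induction m using Nat.strong_induction_on with
  | _ m ih =>
    rw [goB]
    have hmod : PySem.Int.mod (m : Int) 10 = ((m % 10 : Nat) : Int) := by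
      exact_mod_cast PySem.Int.mod_natCast m 10
    by_cases h10 : m < 10
    · have h10' : (m : Int) < 10 := by omega
      rw [digs, if_pos h10]
      simp only [List.map_cons, List.map_nil, List.foldl_cons, List.foldl_nil,
        pyDigit_digitChar m h10, dif_pos h10', stepB, hmod,
        Nat.mod_eq_of_lt h10]
    · have h10' : ¬ ((m : Int) < 10) := by omega
      have hdiv : PySem.Int.floordiv (m : Int) 10 = ((m / 10 : Nat) : Int) := by
        exact_mod_cast PySem.Int.floordiv_natCast m 10
      rw [digs, if_neg h10]
      simp only [List.map_append, List.map_cons, List.map_nil, List.foldl_append,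
        List.foldl_cons, List.foldl_nil, pyDigit_digitChar (m % 10) (by omega),
        dif_neg h10', hdiv, ih (m / 10) (by omega), stepB, hmod]

-- relation between A's state and B's: op = o, and e encodes (ep, has_even)
def encode (st : Int × Int × Bool) : Option Int × Int :=
  ((if st.2.2 then some st.1 else none), st.2.1)

theorem step_rel (st : Int × Int × Bool) (d : Int) (hst : st.2.2 = false → st.1 = 1) :
    stepB (encode st) d = encode (stepA st d) ∧
    ((stepA st d).2.2 = false → (stepA st d).1 = 1) := by
  obtain ⟨ep, op, he⟩ := st
  cases he
  · have hep : ep = 1 := hst rfl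
    subst hep
    simp only [stepA, stepB, encode]
    split_ifs with h1 h2 <;> simp_all
  · simp only [stepA, stepB, encode]
    split_ifs with h1 h2 <;> simp_all

theorem fold_rel (ds : List Int) : ∀ (st : Int × Int × Bool), (st.2.2 = false → st.1 = 1) →
    ds.foldl stepB (encode st) = encode (ds.foldl stepA st) ∧
    ((ds.foldl stepA st).2.2 = false → (ds.foldl stepA st).1 = 1) := by
  induction ds with
  | nil => intro st hst; exact ⟨rfl, hst⟩
  | cons d t ih =>
    intro st hst
    obtain ⟨hstep, hinv⟩ := step_rel st d hst
    simp only [List.foldl_cons, hstep]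
    exact ih (stepA st d) hinv

-- ===== VERDICT (by name: the statement is the Claim_ definition above) =====
theorem calculate_bonus_spec : Claim_equal_calculate_bonus := by
  intro rating _ hpre
  unfold Spec_calculate_bonus
  obtain ⟨m, rfl⟩ : ∃ m : Nat, rating = (m : Int) :=
    ⟨rating.toNat, (Int.toNat_of_nonneg hpre).symm⟩
  have hA : (digs m).foldl (fun (st : Int × Int × Bool) c =>
      let d := pyDigit c
      if d ≠ 0 ∧ PySem.Int.mod d 2 = 0 then (st.1 * d, st.2.1, true)
      else if PySem.Int.mod d 2 = 1 then (st.1, st.2.1 * d, st.2.2)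
      else st) (1, 1, false)
      = ((digs m).map pyDigit).foldl stepA (1, 1, false) := by
    rw [List.foldl_map]
    rfl
  have hrel := fold_rel ((digs m).map pyDigit) (1, 1, false) (fun _ => rfl)
  have henc : (encode (1, 1, false) : Option Int × Int) = (none, 1) := rfl
  simp only [calculate_bonus, calculate_bonus_alt, toChars_nonneg, goB_digs, hA]
  rw [← henc, hrel.1]
  cases h : (((digs m).map pyDigit).foldl stepA (1, 1, false)).2.2 <;> simp [encode, h]
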